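-- pv_equiv track=rewrite | github.com/RitaLB/INE5421_Formais | lexico/parser.py | find_bracket_groups
-- ===== SOURCE A (Python) =====
-- def find_bracket_groups(expr_str: str) -> list[str]:
--     """
--     Encontra todos os grupos de colchetes (como [a-z], [0-9]) em uma string de expressão.
--     Substitui a funcionalidade de re.findall(r'\[[^\]]+\]', expr_str).
--
--     Args:
--         expr_str: A string da expressão regular a ser parseada.
--
--     Returns:
--         Uma lista de strings, onde cada string é um grupo encontrado (e.g., ["[a-zA-Z]", "[0-9]"]).
--     """
--     groups_found = []
--     i = 0
--     n = len(expr_str)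
--     while i < n:
--         if expr_str[i] == '[':
--             start_bracket_pos = i
--             j = i + 1  # Ponteiro para encontrar o colchete de fechamento ']'
--
--             end_bracket_pos = -1 # Inicializa como não encontrado
--             # Procura pelo colchete de fechamento ']'
--             while j < n:
--                 if expr_str[j] == ']':
--                     end_bracket_pos = j
--                     break
--                 j += 1
--
--             if end_bracket_pos != -1: # Se encontrou um ']'
--                 # Verifica se o conteúdo entre colchetes não está vazio
--                 # Ex: "[abc]" é válido, "[]" não é (pois [^\]]+ requer ao menos um caractere)
--                 if end_bracket_pos > start_bracket_pos + 1: # Se tem conteúdo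
--                     groups_found.append(expr_str[start_bracket_pos : end_bracket_pos + 1])
--                     i = end_bracket_pos + 1  # Continua a busca após o grupo encontrado
--                 else:
--                     # É um grupo vazio como "[]", que não corresponde a r'\[[^\]]+\]'
--                     # Avança para depois do ']' encontrado para evitar reprocessamento indevido
--                     i = end_bracket_pos + 1
--             else:
--                 # Não encontrou colchete de fechamento para o '[' em start_bracket_pos
--                 # Avança para o próximo caractere após o '[' inicial para continuar a busca
--                 i = start_bracket_pos + 1
--         else:
--             # Caractere atual não é '[', apenas avança
--             i += 1
--
--     return groups_found
-- ===== SOURCE B (Python) =====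
-- def find_bracket_groups(expr_str: str) -> list[str]:
--     # Single forward pass with a state machine: buf is None outside a bracket
--     # group, or the list of content chars seen since the last unconsumed '['.
--     groups = []
--     buf = None
--     for c in expr_str:
--         if buf is None:
--             if c == '[':
--                 buf = []
--         elif c == ']':
--             if buf:
--                 groups.append('[' + ''.join(buf) + ']')
--             buf = None
--         else:
--             buf.append(c)
--     return groups
-- ===== Notes on version B (the rewrite author's own statement) =====
-- stated objective: alternative
-- what changed: Replaces A's index-based outer loop with a nested rescan for the closing ']' of each '[' by a single left-to-right state-machine pass (outside/inside a bracket group with a content buffer), so the input is traversed exactly once.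
import Mathlib
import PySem

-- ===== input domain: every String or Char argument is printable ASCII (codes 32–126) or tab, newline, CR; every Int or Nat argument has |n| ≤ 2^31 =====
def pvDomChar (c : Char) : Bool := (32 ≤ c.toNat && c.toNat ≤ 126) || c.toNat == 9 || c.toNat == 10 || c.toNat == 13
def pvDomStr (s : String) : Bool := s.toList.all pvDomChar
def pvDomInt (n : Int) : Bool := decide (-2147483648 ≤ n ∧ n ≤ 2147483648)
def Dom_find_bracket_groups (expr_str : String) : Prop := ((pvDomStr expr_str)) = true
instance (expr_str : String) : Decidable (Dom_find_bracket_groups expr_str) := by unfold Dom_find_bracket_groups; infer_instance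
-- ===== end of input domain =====

-- B replaces A's two-pointer index scan (with an inner rescan for each '[')
-- by a single left-to-right state-machine pass; objective: alternative/simpler.

-- ===== PORT A =====
-- inner 'while j < n' loop of A: scan for the first ']' at or after j.
-- Python's '-1 / found position' sentinel is rendered as Option Nat (exact);
-- the fuel argument (≥ n - j at every call) only makes the recursion structural.
def fbgFindClose (s : List Char) (n : Nat) : Nat → Nat → Option Nat
  | 0, _ => none
  | fuel + 1, j =>
      if j < n then
        if s.getD j ' ' = ']' then some j else fbgFindClose s n fuel (j + 1)
      else none

-- outer 'while i < n' loop of A, state = (i, groups_found); fuel ≥ n - i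
def fbgLoop (s : List Char) (n : Nat) : Nat → Nat → List String → List String
  | 0, _, acc => acc
  | fuel + 1, i, acc =>
      if i < n then
        if s.getD i ' ' = '[' then
          match fbgFindClose s n n (i + 1) with
          | some e =>
              if e > i + 1 then
                fbgLoop s n fuel (e + 1) (acc ++ [String.ofList ((s.drop i).take (e + 1 - i))])
              else fbgLoop s n fuel (e + 1) acc
          | none => fbgLoop s n fuel (i + 1) acc
        else fbgLoop s n fuel (i + 1) acc
      else acc

def find_bracket_groups (expr_str : String) : List String :=
  fbgLoop expr_str.toList expr_str.toList.length expr_str.toList.length 0 []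

-- ===== PORT B =====
-- state machine step: st.2 = none (outside a group) or some buf (content so far)
def fbgStep (st : List String × Option (List Char)) (c : Char) :
    List String × Option (List Char) :=
  match st.2 with
  | none => if c = '[' then (st.1, some []) else st
  | some buf =>
      if c = ']' then
        if buf ≠ [] then (st.1 ++ [String.ofList ('[' :: buf ++ [']'])], none)
        else (st.1, none)
      else (st.1, some (buf ++ [c]))

def find_bracket_groups_alt (expr_str : String) : List String :=
  (expr_str.toList.foldl fbgStep ([], none)).1

-- ===== PRECONDITION & SPEC =====
def Spec_find_bracket_groups (expr_str : String) (out : List String) : Prop := out = find_bracket_groups_alt expr_str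
instance (expr_str : String) (out : List String) : Decidable (Spec_find_bracket_groups expr_str out) := by unfold Spec_find_bracket_groups; infer_instance

-- ===== CLAIM (what is proved, stated in full; the proofs are below) =====
def Claim_equal_find_bracket_groups : Prop := ∀ (expr_str : String), Dom_find_bracket_groups expr_str → Spec_find_bracket_groups expr_str (find_bracket_groups expr_str)

-- ===== LEMMAS AND PROOFS =====

-- split a list at its first ']' (proof-side common characterisation)
def fbgSplit : List Char → Option (List Char × List Char)
  | [] => none
  | c :: cs =>
      if c = ']' then some ([], cs)
      else (fbgSplit cs).map (fun pq => (c :: pq.1, pq.2))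

theorem fbgSplit_eq {cs p q : List Char} (h : fbgSplit cs = some (p, q)) :
    cs = p ++ ']' :: q := by
  induction cs generalizing p q with
  | nil => simp [fbgSplit] at h
  | cons c cs ih =>
    unfold fbgSplit at h
    split at h
    · rename_i hc; subst hc
      simp at h
      obtain ⟨h1, h2⟩ := h
      subst h1; subst h2; rfl
    · cases hp : fbgSplit cs with
      | none => simp [hp] at h
      | some pq =>
        obtain ⟨p', q'⟩ := pq
        rw [hp] at h; simp at h
        obtain ⟨h1, h2⟩ := h
        subst h1; subst h2
        simpa using ih hp

theorem fbgSplit_none {cs : List Char} (h : fbgSplit cs = none) : ']' ∉ cs := by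
  induction cs with
  | nil => simp
  | cons c cs ih =>
    unfold fbgSplit at h
    split at h
    · simp at h
    · rename_i hc
      cases hp : fbgSplit cs with
      | none =>
        simp [ih hp]
        exact fun he => hc he.symm
      | some pq => simp [hp] at h

-- fbgFindClose in terms of fbgSplit on the suffix
theorem fbgFindClose_eq (s : List Char) (fuel j : Nat) (hf : s.length - j ≤ fuel) :
    fbgFindClose s s.length fuel j =
      (fbgSplit (s.drop j)).map (fun pq => j + pq.1.length) := by
  induction fuel generalizing j with
  | zero =>
    have : s.drop j = [] := List.drop_eq_nil_of_le (by omega)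
    simp [fbgFindClose, this, fbgSplit]
  | succ fuel ih =>
    rw [fbgFindClose]
    by_cases h : j < s.length
    · rw [if_pos h]
      have hdrop : s.drop j = s[j] :: s.drop (j + 1) := List.drop_eq_getElem_cons h
      have hget : s.getD j ' ' = s[j] := by simp [List.getD, h]
      rw [hdrop, hget]
      by_cases hc : s[j] = ']'
      · rw [if_pos hc]
        simp only [fbgSplit]
        rw [if_pos hc]
        simp
      · rw [if_neg hc]
        rw [ih (j + 1) (by omega)]
        simp only [fbgSplit]
        rw [if_neg hc]
        cases hp : fbgSplit (s.drop (j + 1)) with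
        | none => simp
        | some pq => simp; omega
    · rw [if_neg h]
      have : s.drop j = [] := List.drop_eq_nil_of_le (by omega)
      simp [this, fbgSplit]

-- structural form of A's outer loop over the remaining suffix
def fbgScan : List Char → List String → List String
  | [], acc => acc
  | c :: rest, acc =>
      if c = '[' then
        match h : fbgSplit rest with
        | some (p, q) =>
            if p ≠ [] then fbgScan q (acc ++ [String.ofList ('[' :: p ++ [']'])])
            else fbgScan q acc
        | none => fbgScan rest acc
      else fbgScan rest acc
termination_by cs => cs.length
decreasing_by
  · have := fbgSplit_eq h; subst this; simp; omega
  · have := fbgSplit_eq h; subst this; simp; omega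
  · simp
  · simp

-- A's index loop computes fbgScan of the suffix
theorem fbgLoop_eq_scan (s : List Char) (fuel i : Nat) (hf : s.length - i ≤ fuel)
    (acc : List String) :
    fbgLoop s s.length fuel i acc = fbgScan (s.drop i) acc := by
  induction fuel generalizing i acc with
  | zero =>
    have : s.drop i = [] := List.drop_eq_nil_of_le (by omega)
    rw [this, fbgLoop, fbgScan]
  | succ fuel ih =>
    rw [fbgLoop]
    by_cases h : i < s.length
    · rw [if_pos h]
      have hdrop : s.drop i = s[i] :: s.drop (i + 1) := List.drop_eq_getElem_cons h
      have hget : s.getD i ' ' = s[i] := by simp [List.getD, h]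
      rw [hget, hdrop]
      by_cases hc : s[i] = '['
      · rw [if_pos hc]
        rw [fbgScan, if_pos hc]
        have hfc := fbgFindClose_eq s s.length (i + 1) (by omega)
        cases hp : fbgSplit (s.drop (i + 1)) with
        | none =>
          rw [hp] at hfc; simp at hfc
          rw [hfc]
          exact ih (i + 1) (by omega) acc
        | some pq =>
          obtain ⟨p, q⟩ := pq
          rw [hp] at hfc; simp at hfc
          rw [hfc]
          have hsr : s.drop (i + 1) = p ++ ']' :: q := fbgSplit_eq hp
          have hq : s.drop (i + 1 + p.length + 1) = q := by
            have h2 : s.drop (i + 1 + p.length + 1) = (s.drop (i + 1)).drop (p.length + 1) := by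
              rw [List.drop_drop]; ring_nf
            rw [h2, hsr, show p ++ ']' :: q = (p ++ [']']) ++ q by simp,
              show p.length + 1 = (p ++ [']']).length by simp, List.drop_left]
          have hqlen : i + 1 + p.length + 1 ≤ s.length := by
            have h1 : (s.drop (i + 1)).length = s.length - (i + 1) := List.length_drop ..
            rw [hsr] at h1; simp at h1; omega
          have htake : (s[i] :: s.drop (i + 1)).take (i + 1 + p.length + 1 - i) =
              '[' :: p ++ [']'] := by
            rw [hc, show i + 1 + p.length + 1 - i = (p.length + 1) + 1 by omega]
            simp only [List.take_succ_cons, hsr]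
            rw [show p ++ ']' :: q = (p ++ [']']) ++ q by simp,
              show p.length + 1 = (p ++ [']']).length by simp, List.take_left]
            simp
          split
          · rename_i e he
            have he' : e = i + 1 + p.length := (Option.some.inj he).symm
            subst he'
            by_cases hple : p = []
            · subst hple
              simp only [List.length_nil, Nat.add_zero] at *
              rw [if_neg (by omega)]
              split
              · rename_i hpq
                exact absurd rfl hpq
              · have := ih (i + 1 + 1) (by omega) acc
                rw [hq] at this
                exact this
            · have hplen : 0 < p.length := List.length_pos_iff.mpr hple
              rw [if_pos (by omega), htake]
              split
              · rename_i p1 q1 hpq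
                injection hpq with h12
                injection h12 with h1 h2
                subst h1; subst h2
                rw [if_pos (by simpa)]
                have := ih (i + 1 + p.length + 1) (by omega)
                  (acc ++ [String.ofList ('[' :: p ++ [']'])])
                rw [hq] at this
                exact this
              · rename_i hpq
                simp at hpq
          · rename_i he
            simp at he
      · rw [if_neg hc]
        rw [fbgScan, if_neg hc]
        exact ih (i + 1) (by omega) acc
    · rw [if_neg h]
      have : s.drop i = [] := List.drop_eq_nil_of_le (by omega)
      rw [this, fbgScan]

-- B's foldl, run from inside a bracket group with content buf so far
theorem fbgFold_inside (cs : List Char) (acc : List String) (buf : List Char) :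
    (cs.foldl fbgStep (acc, some buf)).1 =
      match fbgSplit cs with
      | some (p, q) =>
          ((q.foldl fbgStep
            (if buf ++ p = [] then acc
             else acc ++ [String.ofList ('[' :: (buf ++ p) ++ [']'])], none))).1
      | none => acc := by
  induction cs generalizing buf acc with
  | nil => simp [fbgSplit]
  | cons c cs ih =>
    by_cases hc : c = ']'
    · subst hc
      simp only [List.foldl_cons, fbgStep, fbgSplit]
      by_cases hb : buf = [] <;> simp [hb]
    · have hstep : fbgStep (acc, some buf) c = (acc, some (buf ++ [c])) := by
        simp [fbgStep, hc]
      simp only [List.foldl_cons, hstep]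
      rw [ih]
      simp only [fbgSplit]
      rw [if_neg hc]
      cases hp : fbgSplit cs with
      | none => simp
      | some pq => simp

theorem fbgScan_no_close (cs : List Char) (acc : List String)
    (h : ']' ∉ cs) : fbgScan cs acc = acc := by
  induction cs generalizing acc with
  | nil => rw [fbgScan]
  | cons c cs ih =>
    have hc' : ']' ∉ cs := fun hx => h (List.mem_cons_of_mem _ hx)
    have hsp : fbgSplit cs = none := by
      cases hp : fbgSplit cs with
      | none => rfl
      | some pq =>
        obtain ⟨p, q⟩ := pq
        exact absurd (by rw [fbgSplit_eq hp]; simp) hc'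
    rw [fbgScan]
    by_cases hc : c = '['
    · rw [if_pos hc]
      split
      · rename_i p1 q1 hpq
        rw [hsp] at hpq
        simp at hpq
      · exact ih _ hc'
    · rw [if_neg hc]
      exact ih _ hc'

-- fbgScan equals B's foldl started outside a group
theorem fbgScan_eq_fold (cs : List Char) (acc : List String) :
    fbgScan cs acc = (cs.foldl fbgStep (acc, none)).1 := by
  induction cs, acc using fbgScan.induct with
  | case1 acc => rw [fbgScan]; rfl
  | case2 rest acc p q hsplit hne ih =>
    rw [fbgScan, if_pos rfl]
    have hstep : fbgStep (acc, none) '[' = (acc, some []) := by simp [fbgStep]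
    rw [List.foldl_cons, hstep, fbgFold_inside, hsplit]
    split
    · rename_i p1 q1 hpq
      injection hpq with h12
      injection h12 with h1 h2
      subst h1; subst h2
      rw [if_pos hne]
      simpa [hne] using ih
    · rename_i hpq
      simp at hpq
  | case3 rest acc p q hsplit hnne ih =>
    have hp0 : p = [] := not_not.mp (by simpa using hnne)
    subst hp0
    rw [fbgScan, if_pos rfl]
    have hstep : fbgStep (acc, none) '[' = (acc, some []) := by simp [fbgStep]
    rw [List.foldl_cons, hstep, fbgFold_inside, hsplit]
    split
    · rename_i p1 q1 hpq
      injection hpq with h12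
      injection h12 with h1 h2
      subst h1; subst h2
      rw [if_neg hnne]
      simpa using ih
    · rename_i hpq
      simp at hpq
  | case4 rest acc hsplit ih =>
    rw [fbgScan, if_pos rfl]
    have hstep : fbgStep (acc, none) '[' = (acc, some []) := by simp [fbgStep]
    rw [List.foldl_cons, hstep, fbgFold_inside, hsplit]
    split
    · rename_i p1 q1 hpq
      simp at hpq
    · exact fbgScan_no_close rest acc (fbgSplit_none hsplit)
  | case5 c rest acc hc ih =>
    rw [fbgScan, if_neg hc]
    have hstep : fbgStep (acc, none) c = (acc, none) := by simp [fbgStep, hc]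
    rw [List.foldl_cons, hstep]
    exact ih

-- ===== VERDICT (by name: the statement is the Claim_ definition above) =====
theorem find_bracket_groups_spec : Claim_equal_find_bracket_groups := by
  intro s _
  unfold Spec_find_bracket_groups find_bracket_groups find_bracket_groups_alt
  rw [fbgLoop_eq_scan s.toList s.toList.length 0 (by omega), List.drop_zero, fbgScan_eq_fold]
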